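-- pv_equiv track=rewrite | github.com/XOM91K/EGE | olds/Ilya_2025/25/7.py | dels
-- ===== SOURCE A (Python) =====
-- import math
--
-- def dels(n):
--     dl = []
--     for x in range(2, int(math.sqrt(n)) + 1):
--         if n % x == 0:
--             dl.append(x)
--             dl.append(n // x)
--     dl = sorted(set(dl))
--     return dl
-- ===== SOURCE B (Python) =====
-- def dels(n):
--     # factorize n by trial division, then build every divisor as a product of
--     # prime powers; finally keep the non-trivial ones in sorted order
--     m = n
--     f = 2
--     divs = [1]
--     while f * f <= m:
--         if m % f == 0:
--             p = 1
--             powers = []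
--             while m % f == 0:
--                 m //= f
--                 p *= f
--                 powers.append(p)
--             divs = divs + [d * q for d in divs for q in powers]
--         f += 1
--     if m > 1:
--         divs = divs + [d * m for d in divs]
--     return sorted(d for d in divs if 1 < d < n)
-- ===== Notes on version B (the rewrite author's own statement) =====
-- stated objective: alternative
-- what changed: B prime-factorizes n by trial division and generates every divisor multiplicatively from the prime powers, instead of A's collection of divisor/cofactor pairs up to sqrt(n) with set-deduplication.
-- crash fix: On negative n A raises ValueError (math.sqrt of a negative number) while B returns []. — e.g. on dels(-5): A raises ValueError, B returns []
import Mathlib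
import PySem

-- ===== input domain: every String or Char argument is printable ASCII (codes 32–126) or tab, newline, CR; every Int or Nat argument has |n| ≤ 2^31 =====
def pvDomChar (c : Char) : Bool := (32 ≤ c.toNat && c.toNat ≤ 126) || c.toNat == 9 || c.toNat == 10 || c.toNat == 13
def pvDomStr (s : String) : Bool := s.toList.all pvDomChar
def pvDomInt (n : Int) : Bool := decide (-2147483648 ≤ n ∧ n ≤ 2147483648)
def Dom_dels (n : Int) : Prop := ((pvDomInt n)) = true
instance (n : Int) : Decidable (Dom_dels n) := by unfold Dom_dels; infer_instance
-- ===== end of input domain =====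

-- B prime-factorizes n by trial division and builds every divisor multiplicatively
-- from the prime powers, instead of A's divisor/cofactor pairing up to sqrt(n) with
-- set-deduplication (objective: alternative).

-- ===== PORT A =====
-- int(math.sqrt(n)) is ported as Nat.sqrt of n.toNat: exact for 0 ≤ n ≤ 2^31 (the claimed
-- domain), where math.sqrt's correctly-rounded double equals the integer square root.
def dels (n : Int) : List Int :=
  let dl : List Int :=
    (PySem.List.pyRange 2 (((n.toNat.sqrt : Int)) + 1)).foldl
      (fun dl x =>
        if PySem.Int.mod n x == 0 then
          (dl ++ [x]) ++ [PySem.Int.floordiv n x]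
        else dl) []
  PySem.List.sorted (PySem.Set.ofList dl) (fun x => x) false

-- ===== PORT B =====
-- the inner 'while m % f == 0' loop of Source B (state: m, p, powers); the fuel argument
-- only makes the structural recursion total — the callers pass enough fuel for every
-- iteration the Python loop performs, so the computation is the Python's
def delsInner : Nat → Int → Int → Int → List Int → Int × Int × List Int
  | 0, m, _, p, pw => (m, p, pw)
  | fuel + 1, m, f, p, pw =>
    if PySem.Int.mod m f == 0 then
      delsInner fuel (PySem.Int.floordiv m f) f (p * f) (pw ++ [p * f])
    else (m, p, pw)

-- the outer 'while f * f <= m' loop of Source B (state: m, f, divs); fuel as above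
def delsOuter : Nat → Int → Int → List Int → Int × List Int
  | 0, m, _, divs => (m, divs)
  | fuel + 1, m, f, divs =>
    if f * f ≤ m then
      if PySem.Int.mod m f == 0 then
        let r := delsInner (m.toNat + 1) m f 1 []
        delsOuter fuel r.1 (f + 1) (divs ++ divs.flatMap (fun d => r.2.2.map (fun q => d * q)))
      else delsOuter fuel m (f + 1) divs
    else (m, divs)

def dels_alt (n : Int) : List Int :=
  let r := delsOuter (n.toNat + 1) n 2 [1]
  let m := r.1
  let divs := r.2
  let divs := if 1 < m then divs ++ divs.map (fun d => d * m) else divs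
  PySem.List.sorted (divs.filter (fun d => decide (1 < d ∧ d < n))) (fun x => x) false

-- ===== PRECONDITION & SPEC =====
-- Pre_ excludes exactly the negative inputs, where A raises ValueError via math.sqrt.
def Pre_dels (n : Int) : Prop := 0 ≤ n
instance (n : Int) : Decidable (Pre_dels n) := by unfold Pre_dels; infer_instance
def pvWitness_dels : Int := 36

-- On negative n A raises ValueError (math.sqrt of a negative number) while B returns [].
def Raises_dels (n : Int) : Prop := n < 0
instance (n : Int) : Decidable (Raises_dels n) := by unfold Raises_dels; infer_instance
def pvRaiseWitness_dels : Int := -5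
def pvRaiseWitnessOut_dels : List Int := []

def Spec_dels (n : Int) (out : List Int) : Prop := out = dels_alt n
instance (n : Int) (out : List Int) : Decidable (Spec_dels n out) := by unfold Spec_dels; infer_instance

-- ===== CLAIM (what is proved, stated in full; the proofs are below) =====
def Claim_equal_dels : Prop := ∀ (n : Int), Dom_dels n → Pre_dels n → Spec_dels n (dels n)
def Claim_raises_dels : Prop := (∀ (n : Int), Dom_dels n → Raises_dels n → ¬ Pre_dels n) ∧ (Dom_dels (pvRaiseWitness_dels) ∧ Raises_dels (pvRaiseWitness_dels) ∧ dels_alt (pvRaiseWitness_dels) = pvRaiseWitnessOut_dels)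

-- ===== LEMMAS AND PROOFS =====

-- integer division by f ≥ 2 does not increase a positive m
lemma ediv_decr (m f : Int) (hm : 0 < m) (hf : 2 ≤ f) : 0 ≤ m / f ∧ m / f < m := by
  have h0 : 0 ≤ m / f := Int.ediv_nonneg (by omega) (by omega)
  have h1 : m / f * f ≤ m := Int.ediv_mul_le m (by omega)
  have h2 : 2 * (m / f) ≤ m := by nlinarith
  omega

lemma sqrt_sq_le (n : Int) (hn : 0 ≤ n) : ((n.toNat.sqrt : Int)) * ((n.toNat.sqrt : Int)) ≤ n := by
  have h := Nat.sqrt_le' n.toNat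
  rw [pow_two] at h
  have h' : ((n.toNat.sqrt * n.toNat.sqrt : Nat) : Int) ≤ ((n.toNat : Nat) : Int) :=
    Int.ofNat_le.mpr h
  rw [Int.toNat_of_nonneg hn] at h'
  push_cast at h'
  exact h'

lemma lt_succ_sqrt_sq (n : Int) (hn : 0 ≤ n) :
    n < (((n.toNat.sqrt : Int)) + 1) * (((n.toNat.sqrt : Int)) + 1) := by
  have h := Nat.lt_succ_sqrt' n.toNat
  rw [Nat.succ_eq_add_one, pow_two] at h
  have h' : ((n.toNat : Nat) : Int) < (((n.toNat.sqrt + 1) * (n.toNat.sqrt + 1) : Nat) : Int) :=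
    Int.ofNat_lt.mpr h
  rw [Int.toNat_of_nonneg hn] at h'
  push_cast at h'
  exact h'

-- n // d is the cofactor of an exact division
lemma floordiv_of_factor (n d c : Int) (hd : 0 < d) (hc : n = d * c) :
    PySem.Int.floordiv n d = c := by
  rw [PySem.Int.floordiv_eq_ediv_of_pos hd, hc,
    Int.mul_ediv_cancel_left _ (by omega : d ≠ 0)]

-- membership of A's accumulated list dl
lemma mem_dl (n a : Int) :
    a ∈ (PySem.List.pyRange 2 (((n.toNat.sqrt : Int)) + 1)).foldl
      (fun dl x =>
        if PySem.Int.mod n x == 0 then (dl ++ [x]) ++ [PySem.Int.floordiv n x] else dl)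
      ([] : List Int)
    ↔ ∃ x ∈ PySem.List.pyRange 2 (((n.toNat.sqrt : Int)) + 1),
        PySem.Int.mod n x = 0 ∧ (a = x ∨ a = PySem.Int.floordiv n x) := by
  have h1 : (PySem.List.pyRange 2 (((n.toNat.sqrt : Int)) + 1)).foldl
      (fun dl x =>
        if PySem.Int.mod n x == 0 then (dl ++ [x]) ++ [PySem.Int.floordiv n x] else dl)
      ([] : List Int)
      = (PySem.List.pyRange 2 (((n.toNat.sqrt : Int)) + 1)).flatMap
          (fun x => if PySem.Int.mod n x == 0 then [x, PySem.Int.floordiv n x] else []) := by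
    rw [PySem.List.foldl_congr_mem _ _
        (fun dl x => dl ++ (if PySem.Int.mod n x == 0 then [x, PySem.Int.floordiv n x] else [])) _
        (by intro acc x _; split <;> simp_all)]
    simpa using PySem.List.foldl_append_eq_flatMap
      (fun x => if PySem.Int.mod n x == 0 then [x, PySem.Int.floordiv n x] else [])
      (PySem.List.pyRange 2 (((n.toNat.sqrt : Int)) + 1)) []
  rw [h1]
  simp only [List.mem_flatMap]
  constructor
  · rintro ⟨x, hx, hmem⟩
    split at hmem
    · next h =>
      exact ⟨x, hx, by simpa using h, by simpa using hmem⟩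
    · simp at hmem
  · rintro ⟨x, hx, h0, hor⟩
    exact ⟨x, hx, by simp [h0]; tauto⟩

-- A's collected values are exactly the non-trivial divisors
lemma mem_dl_iff_div (n a : Int) (hn : 0 ≤ n) :
    (∃ x ∈ PySem.List.pyRange 2 (((n.toNat.sqrt : Int)) + 1),
        PySem.Int.mod n x = 0 ∧ (a = x ∨ a = PySem.Int.floordiv n x))
    ↔ (2 ≤ a ∧ a < n ∧ a ∣ n) := by
  have hs1 := sqrt_sq_le n hn
  have hs2 := lt_succ_sqrt_sq n hn
  constructor
  · rintro ⟨x, hx, h0, hor⟩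
    obtain ⟨hx2, hxs⟩ := (PySem.List.mem_pyRange_one).mp hx
    obtain ⟨c, hc⟩ := (PySem.Int.mod_eq_zero_iff_dvd n x).mp h0
    have hxx : x * x ≤ n := by nlinarith
    have hcx : x ≤ c := by nlinarith
    rcases hor with rfl | rfl
    · exact ⟨hx2, by nlinarith, ⟨c, hc⟩⟩
    · rw [floordiv_of_factor n x c (by omega) hc]
      refine ⟨by nlinarith, by nlinarith, ⟨x, by linarith [hc, mul_comm x c]⟩⟩
  · rintro ⟨ha2, han, b, hb⟩
    have hb2 : 2 ≤ b := by nlinarith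
    by_cases has : a ≤ (n.toNat.sqrt : Int)
    · exact ⟨a, (PySem.List.mem_pyRange_one).mpr ⟨ha2, by omega⟩,
        (PySem.Int.mod_eq_zero_iff_dvd n a).mpr ⟨b, hb⟩, Or.inl rfl⟩
    · have hbs : b ≤ (n.toNat.sqrt : Int) := by nlinarith
      refine ⟨b, (PySem.List.mem_pyRange_one).mpr ⟨hb2, by omega⟩,
        (PySem.Int.mod_eq_zero_iff_dvd n b).mpr ⟨a, by linarith [hb, mul_comm a b]⟩,
        Or.inr ?_⟩
      rw [floordiv_of_factor n b a (by omega) (by linarith [hb, mul_comm a b])]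

-- dvd transferred to toNat for nonnegative integers
lemma dvd_toNat_iff (x y : Int) (hx : 0 ≤ x) (hy : 0 ≤ y) : x.toNat ∣ y.toNat ↔ x ∣ y := by
  rw [← Int.natCast_dvd_natCast, Int.toNat_of_nonneg hx, Int.toNat_of_nonneg hy]

-- the smallest divisor ≥ 2 of a positive integer is prime
lemma smallest_divisor_prime (f m : Int) (hf : 2 ≤ f) (hm : 0 < m) (hdvd : f ∣ m)
    (hmin : ∀ j : Int, 2 ≤ j → j < f → ¬ j ∣ m) : Prime f := by
  have hF2 : 2 ≤ f.toNat := by omega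
  have hprime := Nat.minFac_prime (by omega : f.toNat ≠ 1)
  set p := f.toNat.minFac with hp
  have hpf : (p : Int) ∣ f := by
    have h1 : (p : Int) ∣ ((f.toNat : Nat) : Int) := Int.natCast_dvd_natCast.mpr (Nat.minFac_dvd _)
    rwa [Int.toNat_of_nonneg (by omega : (0:Int) ≤ f)] at h1
  have hpm : (p : Int) ∣ m := hpf.trans hdvd
  have hp2 : (2 : Int) ≤ (p : Int) := by exact_mod_cast hprime.two_le
  have hple : (p : Int) ≤ f := Int.le_of_dvd (by omega) hpf
  have hnlt : ¬ (p : Int) < f := fun hlt => hmin p hp2 hlt hpm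
  have hpe : (p : Int) = f := by omega
  rw [← hpe]
  exact Int.prime_iff_natAbs_prime.mpr (by simpa using hprime)

-- unique decomposition of a divisor of c * f^j, f prime not dividing c
lemma dvd_mul_pow_decomp (c f : Int) (hf2 : 2 ≤ f) (hp : Prime f) (hfc : ¬ f ∣ c)
    (hc : 0 < c) :
    ∀ (j : Nat) (a : Int), 0 < a → a ∣ c * f ^ j →
      ∃ (d : Int) (i : Nat), 0 < d ∧ d ∣ c ∧ i ≤ j ∧ a = d * f ^ i := by
  intro j
  induction j with
  | zero =>
    intro a ha hdvd
    exact ⟨a, 0, ha, by simpa using hdvd, le_refl 0, by simp⟩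
  | succ j ih =>
    intro a ha hdvd
    by_cases hfa : f ∣ a
    · obtain ⟨b, hb⟩ := hfa
      have hb0 : 0 < b := by nlinarith
      have hbdvd : b ∣ c * f ^ j := by
        have h1 : f * b ∣ f * (c * f ^ j) := by
          rw [← hb]
          calc a ∣ c * f ^ (j + 1) := hdvd
            _ = f * (c * f ^ j) := by ring
        exact (mul_dvd_mul_iff_left (by omega : f ≠ 0)).mp h1
      obtain ⟨d, i, hd0, hdc, hij, hrep⟩ := ih b hb0 hbdvd
      exact ⟨d, i + 1, hd0, hdc, by omega, by rw [hb, hrep]; ring⟩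
    · -- a coprime to f, hence a ∣ c
      have hfn : f.natAbs = f.toNat := by omega
      have hFp : Nat.Prime f.toNat := by
        have := Int.prime_iff_natAbs_prime.mp hp; rwa [hfn] at this
      have hnf : ¬ f.toNat ∣ a.toNat := by
        rw [dvd_toNat_iff f a (by omega) (by omega)]; exact hfa
      have hcop : Nat.Coprime a.toNat (f.toNat ^ (j + 1)) :=
        ((Nat.Prime.coprime_iff_not_dvd hFp).mpr hnf).symm.pow_right _
      have hdvdN : a.toNat ∣ c.toNat * f.toNat ^ (j + 1) := by
        have h1 : a.toNat ∣ (c * f ^ (j+1)).toNat := by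
          rw [dvd_toNat_iff a _ (by omega) (by positivity)]; exact hdvd
        have h2 : (c * f ^ (j+1)).toNat = c.toNat * f.toNat ^ (j+1) := by
          have := Int.toNat_of_nonneg (show (0:Int) ≤ c * f ^ (j+1) by positivity)
          have hc' := Int.toNat_of_nonneg (show (0:Int) ≤ c by omega)
          have hf' := Int.toNat_of_nonneg (show (0:Int) ≤ f by omega)
          have : ((c * f ^ (j+1)).toNat : Int) = ((c.toNat * f.toNat ^ (j+1) : Nat) : Int) := by
            push_cast
            rw [hc', hf', this]
          exact_mod_cast this
        rwa [h2] at h1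
      have hac : a.toNat ∣ c.toNat := hcop.dvd_of_dvd_mul_right hdvdN
      have : a ∣ c := by rw [← dvd_toNat_iff a c (by omega) (by omega)]; exact hac
      exact ⟨a, 0, ha, this, by omega, by simp⟩

-- the representation d * f^i (f ≥ 2, f ∤ d) is unique
lemma pow_factor_inj_aux (f d1 d2 : Int) (i1 i2 : Nat) (hf2 : 2 ≤ f)
    (h1 : ¬ f ∣ d1) (hle : i1 ≤ i2) (heq : d1 * f ^ i1 = d2 * f ^ i2) :
    d1 = d2 ∧ i1 = i2 := by
  have h2 : d1 = d2 * f ^ (i2 - i1) := by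
    apply mul_right_cancel₀ (pow_ne_zero i1 (by omega : f ≠ (0:Int)))
    rw [heq, mul_assoc, ← pow_add]
    congr 2
    omega
  have hii : i2 - i1 = 0 := by
    by_contra hne
    exact h1 (h2 ▸ Dvd.dvd.mul_left (dvd_pow_self f hne) d2)
  exact ⟨by rw [h2, hii, pow_zero, mul_one], by omega⟩

lemma pow_factor_inj (f d1 d2 : Int) (i1 i2 : Nat) (hf2 : 2 ≤ f)
    (h1 : ¬ f ∣ d1) (h2 : ¬ f ∣ d2)
    (heq : d1 * f ^ i1 = d2 * f ^ i2) : d1 = d2 ∧ i1 = i2 := by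
  rcases le_total i1 i2 with hle | hle
  · exact pow_factor_inj_aux f d1 d2 i1 i2 hf2 h1 hle heq
  · obtain ⟨ha, hb⟩ := pow_factor_inj_aux f d2 d1 i2 i1 hf2 h2 hle heq.symm
    exact ⟨ha.symm, hb.symm⟩

-- the inner loop, characterised: it strips f from m and collects the powers of f
lemma delsInner_char (k : Nat) : ∀ (m f p : Int) (pw : List Int),
    m.toNat < k → 0 < m → 2 ≤ f →
    ∃ (j : Nat) (m' : Int),
      delsInner k m f p pw
        = (m', p * f ^ j, pw ++ (List.range j).map (fun i => p * f ^ (i + 1)))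
      ∧ m' * f ^ j = m ∧ ¬ f ∣ m' ∧ 0 < m' := by
  induction k with
  | zero => intro m f p pw hk hm hf; omega
  | succ k ih =>
    intro m f p pw hk hm hf
    simp only [delsInner]
    by_cases hmod : (PySem.Int.mod m f == 0) = true
    · rw [if_pos hmod]
      have hdvd : f ∣ m := (PySem.Int.mod_eq_zero_iff_dvd m f).mp (by simpa using hmod)
      have hde := ediv_decr m f hm hf
      have hz : 0 < m / f := by
        rcases (lt_or_eq_of_le hde.1).symm with h0 | h0
        · exfalso; have := Int.ediv_mul_cancel hdvd; nlinarith [this]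
        · omega
      rw [PySem.Int.floordiv_eq_ediv_of_pos (by omega : (0:Int) < f)]
      obtain ⟨j, m', heq, hfac, hnd, hpos⟩ :=
        ih (m / f) f (p * f) (pw ++ [p * f]) (by omega) hz hf
      refine ⟨j + 1, m', ?_, ?_, hnd, hpos⟩
      · rw [heq]
        have hlist : List.map (fun i => p * f ^ (i + 1)) (List.range (j + 1))
            = p * f :: List.map (fun i => p * f * f ^ (i + 1)) (List.range j) := by
          rw [List.range_succ_eq_map, List.map_cons, List.map_map]
          congr 1
          · norm_num
          · apply List.map_congr_left
            intro i _
            simp only [Function.comp_apply, Nat.succ_eq_add_one, pow_succ]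
            ring
        refine congrArg₂ Prod.mk rfl (congrArg₂ Prod.mk (by ring) ?_)
        rw [hlist]
        simp
      · rw [← Int.ediv_mul_cancel hdvd, ← hfac]
        ring
    · rw [if_neg hmod]
      refine ⟨0, m, by simp, by simp, ?_, hm⟩
      intro hdvd
      exact hmod (by simpa using (PySem.Int.mod_eq_zero_iff_dvd m f).mpr hdvd)

-- one multiplication step keeps divs = (the divisors of the processed part)
lemma step_divs (c f : Int) (j : Nat) (hj : 1 ≤ j) (hf2 : 2 ≤ f) (hp : Prime f)
    (hfc : ¬ f ∣ c) (hc : 0 < c) (divs : List Int) (hnd : divs.Nodup)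
    (hmem : ∀ a, a ∈ divs ↔ 0 < a ∧ a ∣ c) :
    (divs ++ divs.flatMap
        (fun d => ((List.range j).map (fun i => (1:Int) * f ^ (i + 1))).map
          (fun q => d * q))).Nodup
    ∧ ∀ a, a ∈ (divs ++ divs.flatMap
        (fun d => ((List.range j).map (fun i => (1:Int) * f ^ (i + 1))).map
          (fun q => d * q))) ↔ 0 < a ∧ a ∣ c * f ^ j := by
  have hone : ¬ f ∣ (1:Int) := by
    intro h
    have := Int.le_of_dvd one_pos h
    omega
  have hfd : ∀ d ∈ divs, ¬ f ∣ d := by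
    intro d hd hdf
    exact hfc (hdf.trans ((hmem d).mp hd).2)
  have hposd : ∀ d ∈ divs, 0 < d := fun d hd => ((hmem d).mp hd).1
  have hdvdc : ∀ d ∈ divs, d ∣ c := fun d hd => ((hmem d).mp hd).2
  constructor
  · refine List.Nodup.append hnd ?_ ?_
    · refine List.nodup_flatMap.mpr ⟨?_, ?_⟩
      · intro d hd
        rw [List.map_map]
        refine (List.nodup_range).map ?_
        intro i1 i2 h
        simp only [Function.comp_apply] at h
        have h' := mul_left_cancel₀ (ne_of_gt (hposd d hd)) h
        have := pow_factor_inj f 1 1 (i1 + 1) (i2 + 1) hf2 hone hone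
          (by rw [one_mul, one_mul]; rw [one_mul, one_mul] at h'; exact h')
        omega
      · refine List.Pairwise.imp_of_mem ?_ hnd
        intro d1 d2 h1 h2 hne
        intro a ha1 ha2
        simp only [List.map_map, List.mem_map, List.mem_range, Function.comp_apply] at ha1 ha2
        obtain ⟨i1, _, rfl⟩ := ha1
        obtain ⟨i2, _, heqa⟩ := ha2
        have := pow_factor_inj f d2 d1 (i2 + 1) (i1 + 1) hf2 (hfd d2 h2) (hfd d1 h1)
          (by simpa [one_mul] using heqa)
        exact hne this.1.symm
    · intro a ha hafm
      simp only [List.mem_flatMap, List.map_map, List.mem_map, List.mem_range,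
        Function.comp_apply] at hafm
      obtain ⟨d, hd, i, hi, rfl⟩ := hafm
      exact hfd _ ha (Dvd.dvd.mul_left
        (by simpa [one_mul] using dvd_pow_self f (Nat.succ_ne_zero i)) d)
  · intro a
    simp only [List.mem_append, List.mem_flatMap, List.map_map, List.mem_map, List.mem_range,
      Function.comp_apply]
    constructor
    · rintro (ha | ⟨d, hd, i, hi, rfl⟩)
      · exact ⟨hposd a ha, (hdvdc a ha).mul_right _⟩
      · refine ⟨?_, ?_⟩
        · have h1 : (0:Int) < f ^ (i + 1) := pow_pos (by omega) _
          have h2 := hposd d hd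
          rw [one_mul]
          exact mul_pos h2 h1
        · rw [one_mul]
          exact mul_dvd_mul (hdvdc d hd) (pow_dvd_pow f (by omega : i + 1 ≤ j))
    · rintro ⟨ha, hdvd⟩
      obtain ⟨d, i, hd0, hdc, hij, rfl⟩ := dvd_mul_pow_decomp c f hf2 hp hfc hc j _ ha hdvd
      rcases Nat.eq_zero_or_pos i with rfl | hi
      · left
        simpa using (hmem d).mpr ⟨hd0, hdc⟩
      · right
        refine ⟨d, (hmem d).mpr ⟨hd0, hdc⟩, i - 1, by omega, ?_⟩
        rw [one_mul]
        have hi1 : i - 1 + 1 = i := by omega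
        rw [hi1]

-- the outer loop, characterised by the factorisation invariant
lemma delsOuter_char (k : Nat) : ∀ (m f c : Int) (divs : List Int),
    (m + 2 - f).toNat < k → 2 ≤ f → 0 < m → 0 < c →
    (∀ j : Int, 2 ≤ j → j < f → ¬ j ∣ m) →
    (∀ p : Int, Prime p → p ∣ c → p < f) →
    divs.Nodup → (∀ a, a ∈ divs ↔ 0 < a ∧ a ∣ c) →
    ∃ (m' f' c' : Int) (divs' : List Int),
      delsOuter k m f divs = (m', divs') ∧ c' * m' = c * m ∧ 0 < c' ∧ 0 < m' ∧ 2 ≤ f' ∧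
      m' < f' * f' ∧
      (∀ j : Int, 2 ≤ j → j < f' → ¬ j ∣ m') ∧
      (∀ p : Int, Prime p → p ∣ c' → p < f') ∧
      divs'.Nodup ∧ (∀ a, a ∈ divs' ↔ 0 < a ∧ a ∣ c') := by
  induction k with
  | zero => intro m f c divs hk hf hm hc h3 h7 hnd hmem; omega
  | succ k ih =>
    intro m f c divs hk hf hm hc h3 h7 hnd hmem
    simp only [delsOuter]
    by_cases hguard : f * f ≤ m
    · rw [if_pos hguard]
      have h2f : 2 * f ≤ f * f := by nlinarith
      by_cases hmod : (PySem.Int.mod m f == 0) = true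
      · rw [if_pos hmod]
        have hdvdf : f ∣ m := (PySem.Int.mod_eq_zero_iff_dvd m f).mp (by simpa using hmod)
        have hprime : Prime f := smallest_divisor_prime f m hf hm hdvdf h3
        have hfc : ¬ f ∣ c := fun h => absurd (h7 f hprime h) (by omega)
        obtain ⟨j, m'', hinner, hfac, hndvd, hpos⟩ :=
          delsInner_char (m.toNat + 1) m f 1 [] (Nat.lt_succ_self _) hm hf
        have hj1 : 1 ≤ j := by
          rcases Nat.eq_zero_or_pos j with rfl | h
          · exfalso
            apply hndvd
            have hme : m'' = m := by simpa using hfac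
            rw [hme]
            exact hdvdf
          · exact h
        have hfj : f ≤ f ^ j := le_self_pow₀ (by omega) (by omega)
        have hmlt : m'' < m := by nlinarith
        obtain ⟨hnd1, hmem1⟩ := step_divs c f j hj1 hf hprime hfc hc divs hnd hmem
        rw [hinner]
        simp only []
        obtain ⟨m', f', c', divs', hrec, hcm, hc', hm', hf', hflt, h3', h7', hnd', hmem'⟩ :=
          ih m'' (f + 1) (c * f ^ j)
            (divs ++ divs.flatMap
              (fun d => ((List.range j).map (fun i => (1:Int) * f ^ (i + 1))).map
                (fun q => d * q)))
            (by omega) (by omega) hpos (by positivity)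
            (by
              intro j2 hj2 hj2f hj2d
              rcases lt_or_eq_of_le (by omega : j2 ≤ f) with hlt | rfl
              · exact h3 j2 hj2 hlt (hj2d.trans ⟨f ^ j, hfac.symm ▸ by ring⟩)
              · exact hndvd hj2d)
            (by
              intro p hp hpd
              rcases hp.2.2 c (f ^ j) hpd with hpc | hpf
              · have := h7 p hp hpc; omega
              · have hpff : p ∣ f := hp.dvd_of_dvd_pow hpf
                have := Int.le_of_dvd (by omega) hpff
                omega)
            hnd1 hmem1
        refine ⟨m', f', c', divs', hrec, ?_, hc', hm', hf', hflt, h3', h7', hnd', hmem'⟩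
        rw [hcm]
        rw [← hfac]
        ring
      · rw [if_neg hmod]
        refine ih m (f + 1) c divs (by omega) (by omega) hm hc ?_
          (fun p hp hpc => by have := h7 p hp hpc; omega) hnd hmem
        intro j2 hj2 hj2f hj2d
        rcases lt_or_eq_of_le (by omega : j2 ≤ f) with hlt | rfl
        · exact h3 j2 hj2 hlt hj2d
        · exact hmod (by simpa using (PySem.Int.mod_eq_zero_iff_dvd m j2).mpr hj2d)
    · rw [if_neg hguard]
      exact ⟨m, f, c, divs, rfl, by ring, hc, hm, hf, by omega, h3, h7, hnd, hmem⟩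

-- B's divisor list before the final filter: nodup, and exactly the divisors of n
lemma dels_alt_divs (n : Int) (hn : 1 ≤ n) :
    (if 1 < (delsOuter (n.toNat + 1) n 2 [1]).1 then
        (delsOuter (n.toNat + 1) n 2 [1]).2 ++ (delsOuter (n.toNat + 1) n 2 [1]).2.map (fun d => d * (delsOuter (n.toNat + 1) n 2 [1]).1)
      else (delsOuter (n.toNat + 1) n 2 [1]).2).Nodup
    ∧ ∀ a, a ∈ (if 1 < (delsOuter (n.toNat + 1) n 2 [1]).1 then
        (delsOuter (n.toNat + 1) n 2 [1]).2 ++ (delsOuter (n.toNat + 1) n 2 [1]).2.map (fun d => d * (delsOuter (n.toNat + 1) n 2 [1]).1)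
      else (delsOuter (n.toNat + 1) n 2 [1]).2) ↔ 0 < a ∧ a ∣ n := by
  obtain ⟨m', f', c', divs', heq, hcm, hc', hm', hf', hflt, h3', h7', hnd', hmem'⟩ :=
    delsOuter_char (n.toNat + 1) n 2 1 [1] (by omega) (by omega) (by omega) one_pos
      (by intro j hj2 hjf; omega)
      (by intro p hp hpd; exact absurd (isUnit_of_dvd_one hpd) hp.not_unit)
      (List.nodup_singleton 1)
      (by
        intro a
        simp only [List.mem_singleton]
        constructor
        · rintro rfl; exact ⟨one_pos, dvd_refl 1⟩
        · rintro ⟨ha, hd⟩; exact Int.eq_one_of_dvd_one (by omega) hd)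
  rw [heq]
  simp only []
  rw [one_mul] at hcm
  by_cases hm1 : 1 < m'
  · rw [if_pos hm1]
    -- m' is prime: it is > 1, has no divisor in [2, f'), and m' < f' * f'
    have hFp := Nat.minFac_prime (show m'.toNat ≠ 1 by omega)
    set q := m'.toNat.minFac with hqdef
    have hq2 : (2 : Int) ≤ (q : Int) := by exact_mod_cast hFp.two_le
    have hqd : (q : Int) ∣ m' := by
      have h1 : (q : Int) ∣ ((m'.toNat : Nat) : Int) := Int.natCast_dvd_natCast.mpr (Nat.minFac_dvd _)
      rwa [Int.toNat_of_nonneg (by omega)] at h1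
    have hqf : f' ≤ (q : Int) := le_of_not_gt fun h => h3' q hq2 h hqd
    obtain ⟨r, hr⟩ := hqd
    have hr1 : 0 < r := by nlinarith
    have hrd : r ∣ m' := ⟨q, by rw [hr]; ring⟩
    have hre : r = 1 := by
      by_contra hne
      have hr2 : 2 ≤ r := by omega
      have hrf : f' ≤ r := le_of_not_gt fun h => h3' r hr2 h hrd
      nlinarith
    have hmq : m' = (q : Int) := by rw [hr, hre, mul_one]
    have hprime : Prime m' := by
      rw [hmq]
      exact Int.prime_iff_natAbs_prime.mpr (by simpa using hFp)
    have hndvd : ¬ m' ∣ c' := fun h => by have := h7' m' hprime h; omega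
    have hfd' : ∀ d ∈ divs', ¬ m' ∣ d := by
      intro d hd hmd
      exact hndvd (hmd.trans ((hmem' d).mp hd).2)
    constructor
    · refine List.Nodup.append hnd' (hnd'.map ?_) ?_
      · intro d1 d2 h
        exact mul_right_cancel₀ (by omega : m' ≠ 0) h
      · intro a ha hamap
        obtain ⟨d, hd, rfl⟩ := List.mem_map.mp hamap
        exact hfd' _ ha (Dvd.intro_left d rfl)
    · intro a
      rw [List.mem_append, List.mem_map]
      constructor
      · rintro (ha | ⟨d, hd, rfl⟩)
        · obtain ⟨h0, hdc⟩ := (hmem' a).mp ha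
          exact ⟨h0, hcm ▸ hdc.mul_right m'⟩
        · obtain ⟨h0, hdc⟩ := (hmem' d).mp hd
          exact ⟨mul_pos h0 (by omega), hcm ▸ mul_dvd_mul_right hdc m'⟩
      · rintro ⟨ha, hdvd⟩
        have hdvd' : a ∣ c' * m' ^ 1 := by rw [pow_one, hcm]; exact hdvd
        obtain ⟨d, i, hd0, hdc, hij, rfl⟩ :=
          dvd_mul_pow_decomp c' m' (by omega) hprime hndvd hc' 1 _ ha hdvd'
        interval_cases i
        · left; simpa using (hmem' d).mpr ⟨hd0, hdc⟩
        · right; exact ⟨d, (hmem' d).mpr ⟨hd0, hdc⟩, by rw [pow_one]⟩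
  · rw [if_neg hm1]
    have hme : m' = 1 := by omega
    rw [hme, mul_one] at hcm
    subst hcm
    exact ⟨hnd', hmem'⟩

-- ===== VERDICT (by name: the statement is the Claim_ definition above) =====
-- the canonical strictly increasing list of non-trivial divisors
lemma both_eq_canonical (n : Int) (hn : 1 ≤ n) : dels n = dels_alt n := by
  obtain ⟨hnd, hmem⟩ := dels_alt_divs n hn
  unfold dels dels_alt
  simp only []
  set ys := (PySem.List.pyRange 2 n).filter (fun x => PySem.Int.mod n x == 0) with hys
  have hyspw : List.Pairwise (· < ·) ys :=
    (PySem.List.pairwise_lt_pyRange_one (a := 2) (b := n)).filter _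
  have hysmem : ∀ a, a ∈ ys ↔ 2 ≤ a ∧ a < n ∧ a ∣ n := by
    intro a
    rw [hys, List.mem_filter, PySem.List.mem_pyRange_one]
    simp only [beq_iff_eq]
    rw [PySem.Int.mod_eq_zero_iff_dvd]
    tauto
  have hA : PySem.List.sorted (PySem.Set.ofList
      ((PySem.List.pyRange 2 (((n.toNat.sqrt : Int)) + 1)).foldl
        (fun dl x => if PySem.Int.mod n x == 0 then (dl ++ [x]) ++ [PySem.Int.floordiv n x]
          else dl) [])) (fun x => x) false = ys := by
    apply PySem.List.sorted_eq_of_perm_of_pairwise_lt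
    · refine (List.perm_ext_iff_of_nodup (hyspw.imp ne_of_lt) (PySem.Set.nodup_ofList _)).mpr ?_
      intro a
      rw [PySem.Set.mem_ofList, mem_dl, mem_dl_iff_div n a (by omega), hysmem]
    · exact hyspw
  have hB : PySem.List.sorted
      ((if 1 < (delsOuter (n.toNat + 1) n 2 [1]).1 then
          (delsOuter (n.toNat + 1) n 2 [1]).2 ++ (delsOuter (n.toNat + 1) n 2 [1]).2.map (fun d => d * (delsOuter (n.toNat + 1) n 2 [1]).1)
        else (delsOuter (n.toNat + 1) n 2 [1]).2).filter (fun d => decide (1 < d ∧ d < n)))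
      (fun x => x) false = ys := by
    apply PySem.List.sorted_eq_of_perm_of_pairwise_lt
    · refine (List.perm_ext_iff_of_nodup (hyspw.imp ne_of_lt) (hnd.filter _)).mpr ?_
      intro a
      rw [hysmem, List.mem_filter, hmem a]
      simp only [decide_eq_true_eq]
      constructor
      · rintro ⟨h1, h2, h3⟩; exact ⟨⟨by omega, h3⟩, by omega, h2⟩
      · rintro ⟨⟨h1, h2⟩, h3, h4⟩; exact ⟨by omega, h4, h2⟩
    · exact hyspw
  rw [hA, hB]

theorem dels_spec : Claim_equal_dels := by
  intro n _ hpre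
  have hn : (0 : Int) ≤ n := hpre
  unfold Spec_dels
  by_cases hn1 : 1 ≤ n
  · exact both_eq_canonical n hn1
  · have hne : n = 0 := by omega
    subst hne
    unfold dels dels_alt
    decide

theorem dels_raises : Claim_raises_dels := by
  unfold Claim_raises_dels
  exact ⟨by intro n _ h hp; unfold Raises_dels at h; unfold Pre_dels at hp; omega,
    by decide, by decide, by decide⟩

-- witness self-check: B's port really returns [] at the raise witness
theorem dels_raises_witness :
    dels_alt pvRaiseWitness_dels = pvRaiseWitnessOut_dels := dels_raises.2.2.2
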